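-- pv_equiv track=rewrite | github.com/talkowski-lab/athena | athena/utils/misc.py | chromsort
-- ===== SOURCE A (Python) =====
-- def chromsort(contigs):
--     """
--     Sort a list of strings according to chromosome order
--     """
--
--     def _clean_contig_prefixes(contig):
--         return contig.replace('chr', '').replace('Chr', 'chr')
--
--     def _is_numeric_contig(contig):
--         contig = _clean_contig_prefixes(contig)
--         try:
--             int(contig)
--             return True
--         except:
--             return False
--
--     def numeric_sort(contigs):
--         return sorted(contigs, key=lambda k: int(_clean_contig_prefixes(k)))
--
--     nc = numeric_sort([k for k in contigs if _is_numeric_contig(k)])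
--     nnc = sorted([k for k in contigs if not _is_numeric_contig(k)])
--
--     return nc + nnc
-- ===== SOURCE B (Python) =====
-- def chromsort(contigs):
--     """
--     Sort a list of strings according to chromosome order
--     (single stable sort with a two-level key instead of
--     partition + two sorts + concatenation)
--     """
--
--     def _key(k):
--         cleaned = k.replace('chr', '').replace('Chr', 'chr')
--         try:
--             return (0, int(cleaned))
--         except:
--             return (1, k)
--
--     return sorted(contigs, key=_key)
-- ===== Notes on version B (the rewrite author's own statement) =====
-- stated objective: simpler
-- what changed: Replaces the partition-into-two-lists / sort-each / concatenate structure (which classifies every contig twice and re-cleans it for the sort key) by one stable sorted() call with a two-level key: (0, int) for numeric contigs, (1, raw string) for the rest.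
import Mathlib
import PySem

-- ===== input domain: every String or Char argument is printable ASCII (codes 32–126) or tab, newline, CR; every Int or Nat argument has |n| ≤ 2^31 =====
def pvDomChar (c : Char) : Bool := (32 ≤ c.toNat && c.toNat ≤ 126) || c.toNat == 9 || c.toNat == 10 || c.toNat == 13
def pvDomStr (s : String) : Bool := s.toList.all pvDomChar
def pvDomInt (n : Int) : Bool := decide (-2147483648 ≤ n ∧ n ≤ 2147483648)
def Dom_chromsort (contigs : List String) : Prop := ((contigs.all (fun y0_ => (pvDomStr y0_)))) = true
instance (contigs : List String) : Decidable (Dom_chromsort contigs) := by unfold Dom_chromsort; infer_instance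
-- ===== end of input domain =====

-- B: one stable sort with a two-level key replaces A's partition + two sorts + concatenation; same return value.
-- B: one stable sort with a two-level key replaces A's partition + two sorts + concatenation; same return value.
-- ===== PORT A =====
-- _clean_contig_prefixes(contig)
def cleanContigPrefixes (contig : String) : String :=
  PySem.Str.replace (PySem.Str.replace contig "chr" "") "Chr" "chr"
-- _is_numeric_contig(contig): the bare except catches exactly int()'s ValueError, i.e. ofStr? = none
def isNumericContig (contig : String) : Bool :=
  (PySem.Int.ofStr? (cleanContigPrefixes contig)).isSome
-- numeric_sort's key 'int(_clean_contig_prefixes(k))'; .getD 0 only totalizes: every k this is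
-- applied to has passed isNumericContig, so ofStr? is some there and Python's int() cannot raise
def numericKey (k : String) : Int :=
  (PySem.Int.ofStr? (cleanContigPrefixes k)).getD 0
def chromsort (contigs : List String) : List String :=
  let nc := PySem.List.sorted (contigs.filter (fun k => isNumericContig k)) numericKey false
  let nnc := PySem.List.sorted (contigs.filter (fun k => !isNumericContig k)) (fun x => x) false
  nc ++ nnc

-- ===== PORT B =====
-- Source B's key is the Python tuple (0, int(cleaned)) for numeric contigs and (1, k) for the rest;
-- Python's tuple comparison never compares the int with the string (the 0/1 first components keep
-- the groups apart), so the key is encoded as the uniform triple BKey with an inert padding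
-- component per group, and bkeyLT is exactly Python's lexicographic tuple comparison on it.
abbrev BKey := Int × Int × String
def bkeyLT (a b : BKey) : Prop :=
  a.1 < b.1 ∨ (a.1 = b.1 ∧ (a.2.1 < b.2.1 ∨ (a.2.1 = b.2.1 ∧ a.2.2 < b.2.2)))
@[reducible] def bkeyLTinst : LT BKey := ⟨bkeyLT⟩
def bkeyLTdec : (a b : BKey) → Decidable (bkeyLT a b) := fun a b => by
  unfold bkeyLT; infer_instance
def altKey (k : String) : BKey :=
  match PySem.Int.ofStr? (PySem.Str.replace (PySem.Str.replace k "chr" "") "Chr" "chr") with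
  | some n => ((0 : Int), (n : Int), "")
  | none   => ((1 : Int), (0 : Int), k)
def chromsort_alt (contigs : List String) : List String :=
  @PySem.List.sorted String BKey bkeyLTinst bkeyLTdec contigs altKey false

-- ===== PRECONDITION & SPEC =====
def Spec_chromsort (contigs : List String) (out : List String) : Prop := out = chromsort_alt contigs
instance (contigs : List String) (out : List String) : Decidable (Spec_chromsort contigs out) := by unfold Spec_chromsort; infer_instance

-- ===== CLAIM (what is proved, stated in full; the proofs are below) =====
def Claim_equal_chromsort : Prop := ∀ (contigs : List String), Dom_chromsort contigs → Spec_chromsort contigs (chromsort contigs)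

-- ===== LEMMAS AND PROOFS =====

theorem insertBy_append_of_before {α : Type} (b : α → α → Bool) (x : α) (L1 L2 : List α)
    (h : ∀ y ∈ L2, b x y = true) :
    PySem.List.insertBy b x (L1 ++ L2) = PySem.List.insertBy b x L1 ++ L2 := by
  induction L1 with
  | nil =>
    cases L2 with
    | nil => rfl
    | cons y ys => simp [PySem.List.insertBy, h y (by simp)]
  | cons a L1 ih =>
    simp only [List.cons_append, PySem.List.insertBy]
    split_ifs <;> simp [ih]

theorem insertBy_append_of_not_before {α : Type} (b : α → α → Bool) (x : α) (L1 L2 : List α)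
    (h : ∀ y ∈ L1, b x y = false) :
    PySem.List.insertBy b x (L1 ++ L2) = L1 ++ PySem.List.insertBy b x L2 := by
  induction L1 with
  | nil => rfl
  | cons a L1 ih =>
    simp only [List.cons_append, PySem.List.insertBy, h a (by simp)]
    simp only [Bool.false_eq_true, if_false, List.cons.injEq, true_and]
    exact ih (fun y hy => h y (by simp [hy]))

theorem insertBy_congr {α : Type} (b1 b2 : α → α → Bool) (x : α) (ys : List α)
    (h : ∀ y ∈ ys, b1 x y = b2 x y) :
    PySem.List.insertBy b1 x ys = PySem.List.insertBy b2 x ys := by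
  induction ys with
  | nil => rfl
  | cons y ys ih =>
    simp only [PySem.List.insertBy, h y (by simp)]
    split_ifs <;> simp [ih (fun z hz => h z (by simp [hz]))]

theorem foldl_insertBy_split {α : Type} (b : α → α → Bool) (p : α → Bool)
    (hcross : ∀ u v, p u = true → p v = false → b u v = true ∧ b v u = false)
    (xs : List α) : ∀ (L1 L2 : List α),
    (∀ y ∈ L1, p y = true) → (∀ y ∈ L2, p y = false) →
    xs.foldl (fun acc x => PySem.List.insertBy b x acc) (L1 ++ L2) =
      (xs.filter p).foldl (fun acc x => PySem.List.insertBy b x acc) L1 ++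
      (xs.filter (fun x => !p x)).foldl (fun acc x => PySem.List.insertBy b x acc) L2 := by
  induction xs with
  | nil => intro L1 L2 _ _; rfl
  | cons x xs ih =>
    intro L1 L2 hL1 hL2
    by_cases hp : p x = true
    · rw [List.foldl_cons,
        insertBy_append_of_before b x L1 L2 (fun y hy => (hcross x y hp (hL2 y hy)).1),
        ih _ L2 (fun y hy => by
          rcases (PySem.List.mem_insertBy b x y L1).1 hy with rfl | hy
          · exact hp
          · exact hL1 y hy) hL2]
      simp [hp]
    · rw [List.foldl_cons,
        insertBy_append_of_not_before b x L1 L2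
          (fun y hy => (hcross y x (hL1 y hy) (by simpa using hp)).2),
        ih L1 _ hL1 (fun y hy => by
          rcases (PySem.List.mem_insertBy b x y L2).1 hy with rfl | hy
          · simpa using hp
          · exact hL2 y hy)]
      simp [hp]

theorem foldl_insertBy_congr_mem {α : Type} (b1 b2 : α → α → Bool) (S : List α)
    (hb : ∀ u ∈ S, ∀ v ∈ S, b1 u v = b2 u v) (xs : List α) :
    ∀ (acc : List α), (∀ x ∈ xs, x ∈ S) → (∀ y ∈ acc, y ∈ S) →
    xs.foldl (fun acc x => PySem.List.insertBy b1 x acc) acc =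
      xs.foldl (fun acc x => PySem.List.insertBy b2 x acc) acc := by
  induction xs with
  | nil => intro acc _ _; rfl
  | cons x xs ih =>
    intro acc hxs hacc
    have hxS : x ∈ S := hxs x (by simp)
    rw [List.foldl_cons, List.foldl_cons,
      insertBy_congr b1 b2 x acc (fun y hy => hb x hxS y (hacc y hy)),
      ih _ (fun z hz => hxs z (by simp [hz])) (fun y hy => by
        rcases (PySem.List.mem_insertBy b2 x y acc).1 hy with rfl | hy
        · exact hxS
        · exact hacc y hy)]

theorem sorted_congr_mem {α κ1 κ2 : Type} [LT κ1] [DecidableLT κ1] [LT κ2] [DecidableLT κ2]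
    (l : List α) (k1 : α → κ1) (k2 : α → κ2)
    (h : ∀ u ∈ l, ∀ v ∈ l, (k1 u < k1 v ↔ k2 u < k2 v)) :
    PySem.List.sorted l k1 false = PySem.List.sorted l k2 false := by
  rw [PySem.List.sorted_eq_foldl_insertBy, PySem.List.sorted_eq_foldl_insertBy]
  exact foldl_insertBy_congr_mem _ _ l
    (fun u hu v hv => decide_eq_decide.2 (h u hu v hv))
    l [] (fun x hx => hx) (fun y hy => by simp at hy)

theorem altKey_eq_clean (k : String) : altKey k =
    (match PySem.Int.ofStr? (cleanContigPrefixes k) with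
     | some n => ((0 : Int), (n : Int), "")
     | none   => ((1 : Int), (0 : Int), k)) := by
  unfold altKey cleanContigPrefixes
  rfl

theorem chromsort_eq (contigs : List String) : chromsort contigs = chromsort_alt contigs := by
  have hcross : ∀ u v, isNumericContig u = true → isNumericContig v = false →
      (@decide (bkeyLT (altKey u) (altKey v)) (bkeyLTdec _ _)) = true ∧
      (@decide (bkeyLT (altKey v) (altKey u)) (bkeyLTdec _ _)) = false := by
    intro u v hu hv
    unfold isNumericContig at hu hv
    obtain ⟨n, hn⟩ := Option.isSome_iff_exists.1 hu
    have hv' : PySem.Int.ofStr? (cleanContigPrefixes v) = none := by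
      cases h : PySem.Int.ofStr? (cleanContigPrefixes v) <;> simp [h] at hv ⊢
    rw [altKey_eq_clean u, altKey_eq_clean v, hn, hv']
    refine ⟨by simp [bkeyLT], by simp [bkeyLT]⟩
  have split := foldl_insertBy_split
    (fun a c => @decide (bkeyLT (altKey a) (altKey c)) (bkeyLTdec _ _))
    (fun k => isNumericContig k) (fun u v hu hv => hcross u v hu hv) contigs [] []
    (by simp) (by simp)
  have h1 : @PySem.List.sorted String BKey bkeyLTinst bkeyLTdec
        (contigs.filter (fun k => isNumericContig k)) altKey false
      = PySem.List.sorted (contigs.filter (fun k => isNumericContig k)) numericKey false := by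
    refine @sorted_congr_mem String BKey Int bkeyLTinst bkeyLTdec _ _ _ altKey numericKey ?_
    intro u hu v hv
    have hu' := (List.mem_filter.1 hu).2
    have hv' := (List.mem_filter.1 hv).2
    obtain ⟨nu, hnu⟩ := Option.isSome_iff_exists.1 hu'
    obtain ⟨nv, hnv⟩ := Option.isSome_iff_exists.1 hv'
    show bkeyLT (altKey u) (altKey v) ↔ numericKey u < numericKey v
    rw [altKey_eq_clean u, altKey_eq_clean v, hnu, hnv]
    simp [bkeyLT, numericKey, hnu, hnv]
  have h2 : @PySem.List.sorted String BKey bkeyLTinst bkeyLTdec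
        (contigs.filter (fun k => !isNumericContig k)) altKey false
      = PySem.List.sorted (contigs.filter (fun k => !isNumericContig k)) (fun x => x) false := by
    refine @sorted_congr_mem String BKey String bkeyLTinst bkeyLTdec _ _ _ altKey (fun x => x) ?_
    intro u hu v hv
    have hu' := (List.mem_filter.1 hu).2
    have hv' := (List.mem_filter.1 hv).2
    have hu'' : PySem.Int.ofStr? (cleanContigPrefixes u) = none := by
      cases h : PySem.Int.ofStr? (cleanContigPrefixes u) <;>
        simp [isNumericContig, h] at hu' ⊢
    have hv'' : PySem.Int.ofStr? (cleanContigPrefixes v) = none := by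
      cases h : PySem.Int.ofStr? (cleanContigPrefixes v) <;>
        simp [isNumericContig, h] at hv' ⊢
    show bkeyLT (altKey u) (altKey v) ↔ u < v
    rw [altKey_eq_clean u, altKey_eq_clean v, hu'', hv'']
    simp [bkeyLT]
  calc chromsort contigs
      = @PySem.List.sorted String BKey bkeyLTinst bkeyLTdec
          (contigs.filter (fun k => isNumericContig k)) altKey false ++
        @PySem.List.sorted String BKey bkeyLTinst bkeyLTdec
          (contigs.filter (fun k => !isNumericContig k)) altKey false := by
        rw [h1, h2]; rfl
    _ = chromsort_alt contigs := by
        unfold chromsort_alt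
        rw [@PySem.List.sorted_eq_foldl_insertBy String BKey bkeyLTinst bkeyLTdec _ altKey,
          @PySem.List.sorted_eq_foldl_insertBy String BKey bkeyLTinst bkeyLTdec _ altKey,
          @PySem.List.sorted_eq_foldl_insertBy String BKey bkeyLTinst bkeyLTdec _ altKey]
        simpa using split.symm

-- ===== VERDICT (by name: the statement is the Claim_ definition above) =====
theorem chromsort_spec : Claim_equal_chromsort :=
  fun contigs _ => chromsort_eq contigs
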